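-- pv_equiv track=rewrite | github.com/kendall-s/HyPro2_py | processing/procdata/ProcessSealNutrients.py | find_time_matches
-- ===== SOURCE A (Python) =====
-- def find_time_matches(rvi_start_index, rvi_end_index, rvi_times, sample_times):
--     """
--     Finds the relevant indexes in the RV Investigator underway file where the time stamp matches the analysis time
--     stamp. Creates a list of index points to maintain the original index numbering for after the subsetting
--     :param rvi_start_index:
--     :param rvi_end_index:
--     :param rvi_times:
--     :param sample_times:
--     :return: matching_indexes
--     """
--
--     # A list of indexes is created so that it can be related back to the original file for pulling out the Lat/Lons
--     rvi_indexes = [i for i, x in enumerate(rvi_times)]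
--
--     rvi_time_subset = rvi_times[rvi_start_index: rvi_end_index]
--     rvi_index_subset = rvi_indexes[rvi_start_index: rvi_end_index]
--
--     matched_rvi_indexes = []
--     for i, x in enumerate(rvi_time_subset):
--         for y in sample_times:
--             if abs(x - y) < 5:  # Less than 5 because there is a RVI underway point every 5 seconds
--                 matched_rvi_indexes.append(rvi_index_subset[i])
--                 break
--
--     return matched_rvi_indexes
-- ===== SOURCE B (Python) =====
-- def find_time_matches(rvi_start_index, rvi_end_index, rvi_times, sample_times):
--     # Times are integers, so |x - y| < 5 iff x is one of {y-4, ..., y+4}.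
--     # Build that window set once; each subset time is then a single membership test.
--     window = set()
--     for y in sample_times:
--         for d in range(-4, 5):
--             window.add(y + d)
--     idxs = range(len(rvi_times))[rvi_start_index:rvi_end_index]
--     vals = rvi_times[rvi_start_index:rvi_end_index]
--     return [i for i, x in zip(idxs, vals) if x in window]
-- ===== Notes on version B (the rewrite author's own statement) =====
-- stated objective: alternative
-- what changed: Replaces A's inner first-match scan of sample_times per subset time by a precomputed set of all integers within 4 of any sample time, so each subset time becomes a single set-membership test.
import Mathlib
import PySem

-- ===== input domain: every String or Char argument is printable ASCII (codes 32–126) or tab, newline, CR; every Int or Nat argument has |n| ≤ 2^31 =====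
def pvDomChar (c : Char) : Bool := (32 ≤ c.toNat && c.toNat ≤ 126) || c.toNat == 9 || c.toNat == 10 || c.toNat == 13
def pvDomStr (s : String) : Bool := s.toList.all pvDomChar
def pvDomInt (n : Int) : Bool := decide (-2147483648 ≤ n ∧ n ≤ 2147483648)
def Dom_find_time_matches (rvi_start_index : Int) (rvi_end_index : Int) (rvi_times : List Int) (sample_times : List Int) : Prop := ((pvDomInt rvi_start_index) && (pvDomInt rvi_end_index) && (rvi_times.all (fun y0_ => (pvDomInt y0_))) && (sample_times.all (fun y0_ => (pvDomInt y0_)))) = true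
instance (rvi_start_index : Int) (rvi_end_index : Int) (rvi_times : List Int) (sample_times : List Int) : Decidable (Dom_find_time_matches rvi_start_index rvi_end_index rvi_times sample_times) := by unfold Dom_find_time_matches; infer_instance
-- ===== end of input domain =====

-- B replaces A's inner first-match scan of sample_times by a set of all integers within 4 of
-- any sample time, built once, so each subset time is a single membership test (alternative).

-- ===== PORT A =====
-- inner 'for y in sample_times: if abs(x-y) < 5: append; break' — the break means the loop
-- only decides WHETHER to append once, i.e. a first-match scan returning a Bool
def ftmScan (x : Int) : List Int → Bool
  | [] => false
  | y :: ys => if |x - y| < 5 then true else ftmScan x ys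

def find_time_matches (rvi_start_index : Int) (rvi_end_index : Int) (rvi_times : List Int) (sample_times : List Int) : List Int :=
  -- rvi_indexes = [i for i, x in enumerate(rvi_times)]
  let rvi_indexes := PySem.List.pyRange 0 rvi_times.length
  let rvi_time_subset := PySem.List.slice rvi_times (some rvi_start_index) (some rvi_end_index)
  let rvi_index_subset := PySem.List.slice rvi_indexes (some rvi_start_index) (some rvi_end_index)
  -- 'for i, x in enumerate(rvi_time_subset): … rvi_index_subset[i]' paired via zip: the two
  -- slices have the same bounds over lists of the same length, so rvi_index_subset[i] always
  -- exists and the zip walks exactly the same (x, index) pairs as Python's enumerate+index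
  (rvi_time_subset.zip rvi_index_subset).foldl
    (fun acc p => if ftmScan p.1 sample_times then acc ++ [p.2] else acc) []

-- ===== PORT B =====
-- window = {y + d for y in sample_times for d in range(-4, 5)}
def ftmWindow (sample_times : List Int) : PySem.Set Int :=
  sample_times.foldl
    (fun s y => (PySem.List.pyRange (-4) 5).foldl (fun s d => s.add (y + d)) s)
    PySem.Set.empty

def find_time_matches_alt (rvi_start_index : Int) (rvi_end_index : Int) (rvi_times : List Int) (sample_times : List Int) : List Int :=
  let window := ftmWindow sample_times
  -- idxs = range(len(rvi_times))[rvi_start_index:rvi_end_index]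
  let idxs := PySem.List.slice (PySem.List.pyRange 0 rvi_times.length) (some rvi_start_index) (some rvi_end_index)
  let vals := PySem.List.slice rvi_times (some rvi_start_index) (some rvi_end_index)
  -- [i for i, x in zip(idxs, vals) if x in window]
  ((idxs.zip vals).filter (fun p => window.contains p.2)).map Prod.fst

-- ===== PRECONDITION & SPEC =====
def Spec_find_time_matches (rvi_start_index : Int) (rvi_end_index : Int) (rvi_times : List Int) (sample_times : List Int) (out : List Int) : Prop := out = find_time_matches_alt rvi_start_index rvi_end_index rvi_times sample_times
instance (rvi_start_index : Int) (rvi_end_index : Int) (rvi_times : List Int) (sample_times : List Int) (out : List Int) : Decidable (Spec_find_time_matches rvi_start_index rvi_end_index rvi_times sample_times out) := by unfold Spec_find_time_matches; infer_instance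

-- ===== CLAIM (what is proved, stated in full; the proofs are below) =====
def Claim_equal_find_time_matches : Prop := ∀ (rvi_start_index : Int) (rvi_end_index : Int) (rvi_times : List Int) (sample_times : List Int), Dom_find_time_matches rvi_start_index rvi_end_index rvi_times sample_times → Spec_find_time_matches rvi_start_index rvi_end_index rvi_times sample_times (find_time_matches rvi_start_index rvi_end_index rvi_times sample_times)

-- ===== LEMMAS AND PROOFS =====

-- one step of building the window: adds exactly the integers within 4 of y
theorem mem_ftmWindow_step (s : PySem.Set Int) (y x : Int) :
    x ∈ (PySem.List.pyRange (-4) 5).foldl (fun s d => s.add (y + d)) s ↔ x ∈ s ∨ |x - y| < 5 := by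
  have h : PySem.List.pyRange (-4) 5 = [-4,-3,-2,-1,0,1,2,3,4] := by decide
  rw [h]
  simp only [List.foldl, PySem.Set.mem_add, abs_sub_lt_iff]
  by_cases hs : x ∈ s <;> simp [hs] <;> omega

theorem mem_ftmWindow (sample_times : List Int) (x : Int) :
    x ∈ ftmWindow sample_times ↔ ∃ y ∈ sample_times, |x - y| < 5 := by
  suffices h : ∀ (l : List Int) (s : PySem.Set Int),
      x ∈ l.foldl (fun s y => (PySem.List.pyRange (-4) 5).foldl (fun s d => s.add (y + d)) s) s
        ↔ x ∈ s ∨ ∃ y ∈ l, |x - y| < 5 by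
    have := h sample_times PySem.Set.empty
    simpa [ftmWindow, PySem.Set.empty] using this
  intro l
  induction l with
  | nil => simp
  | cons y ys ih =>
    intro s
    simp only [List.foldl_cons, ih, mem_ftmWindow_step, List.mem_cons]
    constructor
    · rintro ((hs | hy) | ⟨z, hz, hlt⟩)
      · exact Or.inl hs
      · exact Or.inr ⟨y, Or.inl rfl, hy⟩
      · exact Or.inr ⟨z, Or.inr hz, hlt⟩
    · rintro (hs | ⟨z, (rfl | hz), hlt⟩)
      · exact Or.inl (Or.inl hs)
      · exact Or.inl (Or.inr hlt)
      · exact Or.inr ⟨z, hz, hlt⟩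

-- A's first-match scan decides exactly membership in B's window
theorem ftmScan_eq_contains (sample_times : List Int) (x : Int) :
    ftmScan x sample_times = (ftmWindow sample_times).contains x := by
  rw [Bool.eq_iff_iff, PySem.Set.contains_iff, mem_ftmWindow]
  induction sample_times with
  | nil => simp [ftmScan]
  | cons y ys ih =>
    simp only [ftmScan, List.mem_cons]
    split_ifs with h
    · simp [h]
    · simp only [ih]
      constructor
      · rintro ⟨z, hz, hlt⟩; exact ⟨z, Or.inr hz, hlt⟩
      · rintro ⟨z, (rfl | hz), hlt⟩
        · exact absurd hlt h
        · exact ⟨z, hz, hlt⟩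

-- ===== VERDICT (by name: the statement is the Claim_ definition above) =====
theorem find_time_matches_spec : Claim_equal_find_time_matches := by
  intro a b rvi samp _
  unfold Spec_find_time_matches find_time_matches find_time_matches_alt
  simp only []
  rw [PySem.List.foldl_append_if (fun p : Int × Int => ftmScan p.1 samp) Prod.snd, List.nil_append]
  rw [← List.zip_swap (PySem.List.slice rvi (some a) (some b))
        (PySem.List.slice (PySem.List.pyRange 0 rvi.length) (some a) (some b)),
      List.filter_map, List.map_map]
  have : ∀ p ∈ (PySem.List.slice rvi (some a) (some b)).zip
      (PySem.List.slice (PySem.List.pyRange 0 rvi.length) (some a) (some b)),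
      ftmScan p.1 samp = ((fun p : Int × Int => (ftmWindow samp).contains p.2) ∘ Prod.swap) p := by
    intro p _
    exact ftmScan_eq_contains samp p.1
  rw [List.filter_congr this]
  rfl
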